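-- pv_equiv track=rewrite | github.com/junseyeon/Do-Algorithm | 코딩마스터즈2/7909_.py | calculate_players_confidence
-- ===== SOURCE A (Python) =====
-- MOD = 1000000007
--
-- def calculate_players_confidence(N, weights, worries, multiplier_w, multiplier_p, updates):
--     confidence_count = [0] * N  # 각 선수가 승리를 확신하는 다른 선수의 수를 저장하는 배열
--
--     for i in range(1, N):
--         weights[i] = (weights[i-1] * multiplier_w) % MOD
--         worries[i] = (worries[i-1] * multiplier_p) % MOD
--
--         for update in updates:
--             if update[0] == i:
--                 multiplier_w, multiplier_p = update[1], update[2]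
--
--         for j in range(i):
--             if weights[j] - worries[j] > weights[i]:
--                 confidence_count[i] += 1
--
--     return confidence_count
-- ===== SOURCE B (Python) =====
-- MOD = 1000000007
--
-- def calculate_players_confidence(N, weights, worries, multiplier_w, multiplier_p, updates):
--     if N <= 1:
--         return [0] * N
--     upd = {}
--     for u in updates:
--         upd[u[0]] = u
--     w, p = weights[0], worries[0]
--     mw, mp = multiplier_w, multiplier_p
--     diffs = []          # kept sorted ascending: the values w_j - p_j seen so far
--     res = [0]
--     for i in range(1, N):
--         d = w - p
--         lo, hi = 0, len(diffs)          # binary search: insertion point (rightmost) for d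
--         while lo < hi:
--             mid = (lo + hi) // 2
--             if diffs[mid] <= d:
--                 lo = mid + 1
--             else:
--                 hi = mid
--         diffs.insert(lo, d)
--         w = (w * mw) % MOD
--         p = (p * mp) % MOD
--         if i in upd:
--             u = upd[i]
--             mw, mp = u[1], u[2]
--         lo, hi = 0, len(diffs)          # binary search: count of diffs <= w
--         while lo < hi:
--             mid = (lo + hi) // 2
--             if diffs[mid] <= w:
--                 lo = mid + 1
--             else:
--                 hi = mid
--         res.append(len(diffs) - lo)
--     return res
-- ===== Notes on version B (the rewrite author's own statement) =====
-- stated objective: faster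
-- what changed: A's per-iteration linear scan of `updates` is replaced by a dict built once, and A's O(N) inner rescan of all earlier players is replaced by keeping the earlier weight-worry differences in a sorted buffer maintained by binary-search insertion, with each count obtained as length minus a binary-search insertion point; B also avoids mutating the input lists.
import Mathlib
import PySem

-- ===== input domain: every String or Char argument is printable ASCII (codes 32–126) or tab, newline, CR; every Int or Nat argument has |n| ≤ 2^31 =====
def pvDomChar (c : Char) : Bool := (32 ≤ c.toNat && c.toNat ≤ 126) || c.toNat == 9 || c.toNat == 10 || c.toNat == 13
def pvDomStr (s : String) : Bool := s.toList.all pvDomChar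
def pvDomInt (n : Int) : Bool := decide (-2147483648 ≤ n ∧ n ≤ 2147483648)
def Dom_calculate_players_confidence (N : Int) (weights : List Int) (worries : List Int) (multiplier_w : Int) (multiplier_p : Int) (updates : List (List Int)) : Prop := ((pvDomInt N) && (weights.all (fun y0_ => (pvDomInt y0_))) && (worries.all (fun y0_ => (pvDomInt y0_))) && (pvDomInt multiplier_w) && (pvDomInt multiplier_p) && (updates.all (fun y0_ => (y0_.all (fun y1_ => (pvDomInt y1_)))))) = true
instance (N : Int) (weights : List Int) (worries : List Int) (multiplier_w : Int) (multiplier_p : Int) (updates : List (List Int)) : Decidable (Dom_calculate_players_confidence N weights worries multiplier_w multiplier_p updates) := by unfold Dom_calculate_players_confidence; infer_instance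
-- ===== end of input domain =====

-- B replaces A's per-step linear scans (over `updates` and over all earlier players) by a dict built
-- once and binary searches over a sorted buffer of the earlier values; equivalence is about the
-- RETURN value only (Python A mutates `weights`/`worries` in place, B does not).

-- ===== PORT A =====
def pvMOD : Int := 1000000007

def pvStepA (updates : List (List Int))
    (st : List Int × List Int × Int × Int × List Int) (i : Int) :
    List Int × List Int × Int × Int × List Int :=
  let ws := st.1
  let ps := st.2.1
  let mw := st.2.2.1
  let mp := st.2.2.2.1
  let conf := st.2.2.2.2
  -- weights[i] = (weights[i-1] * multiplier_w) % MOD ; worries likewise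
  let ws := PySem.List.pySetD ws i (PySem.Int.mod (PySem.List.pyGetD ws (i-1) 0 * mw) pvMOD)
  let ps := PySem.List.pySetD ps i (PySem.Int.mod (PySem.List.pyGetD ps (i-1) 0 * mp) pvMOD)
  -- for update in updates: if update[0] == i: multiplier_w, multiplier_p = update[1], update[2]
  let mwp := updates.foldl (fun (acc : Int × Int) u =>
      if PySem.List.pyGetD u 0 0 == i then (PySem.List.pyGetD u 1 0, PySem.List.pyGetD u 2 0)
      else acc) (mw, mp)
  -- for j in range(i): if weights[j] - worries[j] > weights[i]: confidence_count[i] += 1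
  let conf := (PySem.List.pyRange 0 i 1).foldl (fun conf j =>
      if PySem.List.pyGetD ws j 0 - PySem.List.pyGetD ps j 0 > PySem.List.pyGetD ws i 0 then
        PySem.List.pySetD conf i (PySem.List.pyGetD conf i 0 + 1)
      else conf) conf
  (ws, ps, mwp.1, mwp.2, conf)

def calculate_players_confidence (N : Int) (weights : List Int) (worries : List Int) (multiplier_w : Int) (multiplier_p : Int) (updates : List (List Int)) : List Int :=
  let conf := List.replicate N.toNat 0
  let st := (PySem.List.pyRange 1 N 1).foldl (pvStepA updates)
    (weights, worries, multiplier_w, multiplier_p, conf)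
  st.2.2.2.2

-- ===== PORT B =====
-- the two identical while-loops of Source B: rightmost insertion point by binary search
def pvBisect (diffs : List Int) (x : Int) (lo hi : Int) : Int :=
  if _h : lo < hi then
    if PySem.List.pyGetD diffs (PySem.Int.floordiv (lo + hi) 2) 0 ≤ x then
      pvBisect diffs x (PySem.Int.floordiv (lo + hi) 2 + 1) hi
    else
      pvBisect diffs x lo (PySem.Int.floordiv (lo + hi) 2)
  else lo
termination_by (hi - lo).toNat
decreasing_by
  · have hm : PySem.Int.floordiv (lo + hi) 2 = (lo + hi) / 2 :=
      PySem.Int.floordiv_eq_ediv_of_pos (by omega)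
    rw [hm]; omega
  · have hm : PySem.Int.floordiv (lo + hi) 2 = (lo + hi) / 2 :=
      PySem.Int.floordiv_eq_ediv_of_pos (by omega)
    rw [hm]; omega

def pvUpd (updates : List (List Int)) : PySem.Dict Int (List Int) :=
  updates.foldl (fun d u => d.insert (PySem.List.pyGetD u 0 0) u) PySem.Dict.empty

def pvStepB (upd : PySem.Dict Int (List Int))
    (st : Int × Int × Int × Int × List Int × List Int) (i : Int) :
    Int × Int × Int × Int × List Int × List Int :=
  let w := st.1
  let p := st.2.1
  let mw := st.2.2.1
  let mp := st.2.2.2.1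
  let diffs := st.2.2.2.2.1
  let res := st.2.2.2.2.2
  let d := w - p
  let lo := pvBisect diffs d 0 (diffs.length : Int)
  let diffs := PySem.List.insert diffs lo d
  let w := PySem.Int.mod (w * mw) pvMOD
  let p := PySem.Int.mod (p * mp) pvMOD
  let mwp := match PySem.Dict.get? upd i with
    | some u => (PySem.List.pyGetD u 1 0, PySem.List.pyGetD u 2 0)
    | none => (mw, mp)
  let lo2 := pvBisect diffs w 0 (diffs.length : Int)
  (w, p, mwp.1, mwp.2, diffs, res ++ [(diffs.length : Int) - lo2])

def calculate_players_confidence_alt (N : Int) (weights : List Int) (worries : List Int) (multiplier_w : Int) (multiplier_p : Int) (updates : List (List Int)) : List Int :=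
  if N ≤ 1 then List.replicate N.toNat 0
  else
    let upd := pvUpd updates
    let st := (PySem.List.pyRange 1 N 1).foldl (pvStepB upd)
      (PySem.List.pyGetD weights 0 0, PySem.List.pyGetD worries 0 0,
        multiplier_w, multiplier_p, ([] : List Int), [(0 : Int)])
    st.2.2.2.2.2

-- ===== PRECONDITION & SPEC =====
-- Pre_ excludes exactly the inputs where Python A raises: for N ≥ 2 it reads/writes
-- weights[i]/worries[i] for i < N (IndexError if the lists are shorter than N), reads u[0] of
-- every update (IndexError on []), and u[1], u[2] of every update whose u[0] lies in 1..N-1.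
def Pre_calculate_players_confidence (N : Int) (weights : List Int) (worries : List Int) (multiplier_w : Int) (multiplier_p : Int) (updates : List (List Int)) : Prop :=
  2 ≤ N → (N ≤ (weights.length : Int) ∧ N ≤ (worries.length : Int) ∧
    ∀ u ∈ updates, u ≠ [] ∧ (1 ≤ u.headD 0 ∧ u.headD 0 ≤ N - 1 → 3 ≤ (u.length : Int)))
instance (N : Int) (weights : List Int) (worries : List Int) (multiplier_w : Int) (multiplier_p : Int) (updates : List (List Int)) : Decidable (Pre_calculate_players_confidence N weights worries multiplier_w multiplier_p updates) := by unfold Pre_calculate_players_confidence; infer_instance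

def pvWitness_calculate_players_confidence : Int × List Int × List Int × Int × Int × List (List Int) :=
  (3, [5, 0, 0], [1, 0, 0], 2, 3, [[1, 7, 9]])

def Spec_calculate_players_confidence (N : Int) (weights : List Int) (worries : List Int) (multiplier_w : Int) (multiplier_p : Int) (updates : List (List Int)) (out : List Int) : Prop := out = calculate_players_confidence_alt N weights worries multiplier_w multiplier_p updates
instance (N : Int) (weights : List Int) (worries : List Int) (multiplier_w : Int) (multiplier_p : Int) (updates : List (List Int)) (out : List Int) : Decidable (Spec_calculate_players_confidence N weights worries multiplier_w multiplier_p updates out) := by unfold Spec_calculate_players_confidence; infer_instance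

-- ===== CLAIM (what is proved, stated in full; the proofs are below) =====
def Claim_equal_calculate_players_confidence : Prop := ∀ (N : Int) (weights : List Int) (worries : List Int) (multiplier_w : Int) (multiplier_p : Int) (updates : List (List Int)), Dom_calculate_players_confidence N weights worries multiplier_w multiplier_p updates → Pre_calculate_players_confidence N weights worries multiplier_w multiplier_p updates → Spec_calculate_players_confidence N weights worries multiplier_w multiplier_p updates (calculate_players_confidence N weights worries multiplier_w multiplier_p updates)

-- ===== LEMMAS AND PROOFS =====

-- pvBisect on a sorted segment returns the boundary between the values ≤ x and the values > x
lemma pvBisect_spec (diffs : List Int) (x : Int) : ∀ (n : Nat) (lo hi : Int),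
    (hi - lo).toNat = n → diffs.Pairwise (· ≤ ·) →
    0 ≤ lo → lo ≤ hi → hi ≤ (diffs.length : Int) →
    (∀ k : Nat, (hk : k < diffs.length) → (k : Int) < lo → diffs[k] ≤ x) →
    (∀ k : Nat, (hk : k < diffs.length) → hi ≤ (k : Int) → x < diffs[k]) →
    0 ≤ pvBisect diffs x lo hi ∧ pvBisect diffs x lo hi ≤ (diffs.length : Int) ∧
    (∀ k : Nat, (hk : k < diffs.length) → (k : Int) < pvBisect diffs x lo hi → diffs[k] ≤ x) ∧
    (∀ k : Nat, (hk : k < diffs.length) → pvBisect diffs x lo hi ≤ (k : Int) → x < diffs[k]) := by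
  intro n
  induction n using Nat.strong_induction_on with
  | _ n ih =>
    intro lo hi hn hs h0 hlh hh hpre hpost
    rw [pvBisect]
    by_cases h : lo < hi
    · rw [dif_pos h]
      have hm : PySem.Int.floordiv (lo + hi) 2 = (lo + hi) / 2 :=
        PySem.Int.floordiv_eq_ediv_of_pos (by omega)
      have hb1 : lo ≤ PySem.Int.floordiv (lo + hi) 2 := by rw [hm]; omega
      have hb2 : PySem.Int.floordiv (lo + hi) 2 < hi := by rw [hm]; omega
      have hm0 : 0 ≤ PySem.Int.floordiv (lo + hi) 2 := by omega
      have hmlen : PySem.Int.floordiv (lo + hi) 2 < (diffs.length : Int) := by omega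
      have hmnat : (PySem.Int.floordiv (lo + hi) 2).toNat < diffs.length := by omega
      have hpw := List.pairwise_iff_getElem.mp hs
      by_cases hc : PySem.List.pyGetD diffs (PySem.Int.floordiv (lo + hi) 2) 0 ≤ x
      · rw [if_pos hc]
        rw [PySem.List.pyGetD_eq_getElem diffs 0 hm0 hmlen] at hc
        refine ih (hi - (PySem.Int.floordiv (lo + hi) 2 + 1)).toNat (by omega) _ hi rfl hs
          (by omega) (by omega) hh ?_ hpost
        intro k hk hklt
        rcases Nat.lt_or_ge k (PySem.Int.floordiv (lo + hi) 2).toNat with hlt | hge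
        · exact le_trans (hpw k _ hk hmnat hlt) hc
        · have hke : k = (PySem.Int.floordiv (lo + hi) 2).toNat := by omega
          subst hke; exact hc
      · rw [if_neg hc]
        rw [not_le] at hc
        rw [PySem.List.pyGetD_eq_getElem diffs 0 hm0 hmlen] at hc
        refine ih (PySem.Int.floordiv (lo + hi) 2 - lo).toNat (by omega) lo _ rfl hs
          h0 (by omega) (by omega) hpre ?_
        intro k hk hkge
        rcases Nat.lt_or_ge (PySem.Int.floordiv (lo + hi) 2).toNat k with hlt | hge
        · exact lt_of_lt_of_le hc (hpw _ k hmnat hk hlt)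
        · have hke : k = (PySem.Int.floordiv (lo + hi) 2).toNat := by omega
          subst hke; exact hc
    · rw [dif_neg h]
      have heq : lo = hi := by omega
      exact ⟨h0, by omega, fun k hk hkl => hpre k hk hkl, fun k hk hkg => hpost k hk (by omega)⟩

-- a boundary index r determines the count of elements > x
lemma pvCount_of_boundary (l : List Int) (x : Int) (r : Int)
    (h0 : 0 ≤ r) (hr : r ≤ (l.length : Int))
    (hpre : ∀ k : Nat, (hk : k < l.length) → (k : Int) < r → l[k] ≤ x)
    (hpost : ∀ k : Nat, (hk : k < l.length) → r ≤ (k : Int) → x < l[k]) :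
    (l.countP (fun t => decide (x < t)) : Int) = (l.length : Int) - r := by
  have h1 : (l.take r.toNat).countP (fun t => decide (x < t)) = 0 := by
    rw [List.countP_eq_zero]
    intro a ha
    obtain ⟨k, hk, hka⟩ := List.mem_iff_getElem.mp ha
    simp only [List.length_take] at hk
    have hkl : k < l.length := by omega
    have hle := hpre k hkl (by omega)
    rw [List.getElem_take] at hka
    rw [← hka]
    simp only [decide_eq_true_eq, not_lt]
    exact hle
  have h2 : (l.drop r.toNat).countP (fun t => decide (x < t)) = (l.drop r.toNat).length := by
    rw [List.countP_eq_length]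
    intro a ha
    obtain ⟨k, hk, hka⟩ := List.mem_iff_getElem.mp ha
    simp only [List.length_drop] at hk
    have hkl : r.toNat + k < l.length := by omega
    have hgt := hpost (r.toNat + k) hkl (by omega)
    rw [List.getElem_drop] at hka
    rw [← hka]
    simp only [decide_eq_true_eq]
    exact hgt
  have h3 : l.countP (fun t => decide (x < t))
      = (l.take r.toNat ++ l.drop r.toNat).countP (fun t => decide (x < t)) := by
    rw [List.take_append_drop]
  rw [h3, List.countP_append, h1, h2, List.length_drop]
  omega

-- A's inner j-loop is "bump slot i by the number of j's passing the test"
lemma pvFoldl_bump (q : Int → Prop) [DecidablePred q] (js : List Int) :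
    ∀ (conf : List Int) (i : Int), 0 ≤ i → i < (conf.length : Int) →
    js.foldl (fun conf j =>
        if q j then PySem.List.pySetD conf i (PySem.List.pyGetD conf i 0 + 1) else conf) conf
      = conf.set i.toNat (conf.getD i.toNat 0 + (js.countP (fun j => decide (q j)) : Int)) := by
  induction js with
  | nil =>
    intro conf i h0 hi
    have hnat : i.toNat < conf.length := by omega
    simp only [List.foldl_nil, List.countP_nil, Nat.cast_zero, add_zero]
    rw [List.getD_eq_getElem _ _ hnat, List.set_getElem_self]
  | cons j t ih =>
    intro conf i h0 hi
    have hnat : i.toNat < conf.length := by omega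
    simp only [List.foldl_cons, List.countP_cons]
    by_cases hq : q j
    · rw [if_pos hq, ih _ i h0 (by rw [PySem.List.length_pySetD]; exact hi)]
      rw [PySem.List.pySetD_of_nonneg _ _ h0, PySem.List.pyGetD_eq_getElem _ _ h0 hi]
      rw [List.getD_eq_getElem _ _ (by simpa using hnat),
        List.getElem_set_self (by simpa using hnat), List.set_set,
        List.getD_eq_getElem _ _ hnat]
      congr 1
      simp only [hq, decide_true, if_pos]
      push_cast
      ring
    · rw [if_neg hq, ih _ i h0 hi]
      congr 1
      simp only [hq, decide_false]
      push_cast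
      ring

-- the last update in list order whose key is i
def pvLast (updates : List (List Int)) (i : Int) : Option (List Int) :=
  updates.reverse.find? (fun u => PySem.List.pyGetD u 0 0 == i)

lemma pvLast_cons (u : List Int) (t : List (List Int)) (i : Int) :
    pvLast (u :: t) i = match pvLast t i with
      | some v => some v
      | none => if PySem.List.pyGetD u 0 0 == i then some u else none := by
  unfold pvLast
  rw [List.reverse_cons, List.find?_append]
  cases h : t.reverse.find? (fun v => PySem.List.pyGetD v 0 0 == i) <;>
    cases hq : (PySem.List.pyGetD u 0 0 == i) <;> simp [List.find?, hq]

lemma pvFoldA_upd (l : List (List Int)) (i : Int) :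
    ∀ (a : Int × Int),
    l.foldl (fun (acc : Int × Int) u =>
        if PySem.List.pyGetD u 0 0 == i then
          (PySem.List.pyGetD u 1 0, PySem.List.pyGetD u 2 0)
        else acc) a
      = match pvLast l i with
        | some u => (PySem.List.pyGetD u 1 0, PySem.List.pyGetD u 2 0)
        | none => a := by
  induction l with
  | nil => intro a; simp [pvLast]
  | cons u t ih =>
    intro a
    rw [List.foldl_cons, ih, pvLast_cons]
    cases hpv : pvLast t i <;> cases hq : (PySem.List.pyGetD u 0 0 == i) <;> simp

lemma pvDict_upd (l : List (List Int)) (i : Int) :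
    ∀ (d : PySem.Dict Int (List Int)),
    PySem.Dict.get? (l.foldl (fun d u => d.insert (PySem.List.pyGetD u 0 0) u) d) i
      = match pvLast l i with
        | some u => some u
        | none => d.get? i := by
  induction l with
  | nil => intro d; simp [pvLast]
  | cons u t ih =>
    intro d
    rw [List.foldl_cons, ih, pvLast_cons]
    cases hpv : pvLast t i with
    | some v => rfl
    | none =>
      cases hq : (PySem.List.pyGetD u 0 0 == i) with
      | true =>
        have heq : PySem.List.pyGetD u 0 0 = i := by simpa using hq
        rw [PySem.Dict.get?_insert, if_pos heq.symm]
        simp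
      | false =>
        have hne : ¬ PySem.List.pyGetD u 0 0 = i := by simpa using hq
        rw [PySem.Dict.get?_insert, if_neg (fun h => hne h.symm)]
        simp

lemma pvSet_append (l1 l2 : List Int) (v : Int) :
    (l1 ++ l2).set l1.length v = l1 ++ l2.set 0 v := by
  induction l1 with
  | nil => simp
  | cons a t ih => simp [ih]

-- the loop invariant tying A's state to B's state at the head of iteration i
def pvInv (N : Int) (weights worries : List Int) (i : Int)
    (sA : List Int × List Int × Int × Int × List Int)
    (sB : Int × Int × Int × Int × List Int × List Int) : Prop :=
  sA.2.2.1 = sB.2.2.1 ∧ sA.2.2.2.1 = sB.2.2.2.1 ∧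
  sA.1.length = weights.length ∧ sA.2.1.length = worries.length ∧
  sB.1 = PySem.List.pyGetD sA.1 (i-1) 0 ∧ sB.2.1 = PySem.List.pyGetD sA.2.1 (i-1) 0 ∧
  sB.2.2.2.2.1.Pairwise (· ≤ ·) ∧
  sB.2.2.2.2.1.Perm ((PySem.List.pyRange 0 (i-1) 1).map
    (fun j => PySem.List.pyGetD sA.1 j 0 - PySem.List.pyGetD sA.2.1 j 0)) ∧
  sA.2.2.2.2 = sB.2.2.2.2.2 ++ List.replicate (N - i).toNat 0 ∧
  (sB.2.2.2.2.2.length : Int) = i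

lemma pvStep_inv (N : Int) (weights worries : List Int) (updates : List (List Int)) (i : Int)
    (sA : List Int × List Int × Int × Int × List Int)
    (sB : Int × Int × Int × Int × List Int × List Int)
    (h1 : 1 ≤ i) (h2 : i < N)
    (hw : N ≤ (weights.length : Int)) (hp : N ≤ (worries.length : Int))
    (hinv : pvInv N weights worries i sA sB) :
    pvInv N weights worries (i+1) (pvStepA updates sA i) (pvStepB (pvUpd updates) sB i) := by
  obtain ⟨ws, ps, mwA, mpA, conf⟩ := sA
  obtain ⟨w, p, mwB, mpB, diffs, res⟩ := sB
  obtain ⟨hmw, hmp, hlw, hlp, hwv, hpv, hsort, hperm, hconf, hlen⟩ := hinv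
  dsimp only at hmw hmp hlw hlp hwv hpv hsort hperm hconf hlen
  have hi0 : 0 ≤ i := by omega
  have hiw : i < (ws.length : Int) := by rw [hlw]; omega
  have hip : i < (ps.length : Int) := by rw [hlp]; omega
  -- reading the updated arrays
  have hgfw : ∀ j : Int, 0 ≤ j → j < i →
      PySem.List.pyGetD (PySem.List.pySetD ws i (PySem.Int.mod (PySem.List.pyGetD ws (i - 1) 0 * mwA) pvMOD)) j 0 = PySem.List.pyGetD ws j 0 := by
    intro j hj0 hji
    rw [PySem.List.pySetD_of_nonneg _ _ hi0,
      PySem.List.pyGetD_eq_getElem _ _ hj0 (by rw [List.length_set]; omega),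
      PySem.List.pyGetD_eq_getElem _ _ hj0 (by omega),
      List.getElem_set_ne (by omega)]
  have hgfp : ∀ j : Int, 0 ≤ j → j < i →
      PySem.List.pyGetD (PySem.List.pySetD ps i (PySem.Int.mod (PySem.List.pyGetD ps (i - 1) 0 * mpA) pvMOD)) j 0 = PySem.List.pyGetD ps j 0 := by
    intro j hj0 hji
    rw [PySem.List.pySetD_of_nonneg _ _ hi0,
      PySem.List.pyGetD_eq_getElem _ _ hj0 (by rw [List.length_set]; omega),
      PySem.List.pyGetD_eq_getElem _ _ hj0 (by omega),
      List.getElem_set_ne (by omega)]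
  have hww : PySem.Int.mod (w * mwB) pvMOD = PySem.Int.mod (PySem.List.pyGetD ws (i - 1) 0 * mwA) pvMOD := by rw [hwv, ← hmw]
  have hgiw : PySem.List.pyGetD (PySem.List.pySetD ws i (PySem.Int.mod (PySem.List.pyGetD ws (i - 1) 0 * mwA) pvMOD)) i 0 = PySem.Int.mod (w * mwB) pvMOD := by
    rw [PySem.List.pySetD_of_nonneg _ _ hi0,
      PySem.List.pyGetD_eq_getElem _ _ hi0 (by rw [List.length_set]; omega),
      List.getElem_set_self, hww]
  have hgip : PySem.List.pyGetD (PySem.List.pySetD ps i (PySem.Int.mod (PySem.List.pyGetD ps (i - 1) 0 * mpA) pvMOD)) i 0 = PySem.Int.mod (p * mpB) pvMOD := by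
    rw [PySem.List.pySetD_of_nonneg _ _ hi0,
      PySem.List.pyGetD_eq_getElem _ _ hi0 (by rw [List.length_set]; omega),
      List.getElem_set_self, hpv, ← hmp]
  -- the first binary search of B and the new sorted buffer
  have hspec := pvBisect_spec diffs (w - p) ((diffs.length : Int) - 0).toNat 0 (diffs.length : Int)
    rfl hsort (le_refl 0) (by omega) (by omega)
    (fun k hk hklt => absurd hklt (by omega))
    (fun k hk hkge => absurd hkge (by omega))
  obtain ⟨hr0, hrlen, hrpre, hrpost⟩ := hspec
  have hrnat : (pvBisect diffs (w - p) 0 (diffs.length : Int)).toNat ≤ diffs.length := by omega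
  have hins2 : PySem.List.insert diffs (pvBisect diffs (w - p) 0 (diffs.length : Int)) (w - p) = diffs.take (pvBisect diffs (w - p) 0 (diffs.length : Int)).toNat ++ (w - p) :: diffs.drop (pvBisect diffs (w - p) 0 (diffs.length : Int)).toNat := by
    rw [show (pvBisect diffs (w - p) 0 (diffs.length : Int)) = (((pvBisect diffs (w - p) 0 (diffs.length : Int)).toNat : Nat) : Int) from by omega]
    exact PySem.List.insert_natCast diffs (pvBisect diffs (w - p) 0 (diffs.length : Int)).toNat (w - p) (by omega)
  have hlen2 : ((PySem.List.insert diffs (pvBisect diffs (w - p) 0 (diffs.length : Int)) (w - p)).length : Int) = (diffs.length : Int) + 1 := by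
    rw [hins2]; simp
  have hsort2 : (PySem.List.insert diffs (pvBisect diffs (w - p) 0 (diffs.length : Int)) (w - p)).Pairwise (· ≤ ·) := by
    rw [hins2, List.pairwise_append]
    refine ⟨List.Pairwise.sublist (List.take_sublist _ _) hsort, ?_, ?_⟩
    · rw [List.pairwise_cons]
      refine ⟨?_, List.Pairwise.sublist (List.drop_sublist _ _) hsort⟩
      intro b hb
      obtain ⟨k, hk, hkb⟩ := List.mem_iff_getElem.mp hb
      simp only [List.length_drop] at hk
      rw [List.getElem_drop] at hkb
      rw [← hkb]
      exact le_of_lt (hrpost ((pvBisect diffs (w - p) 0 (diffs.length : Int)).toNat + k) (by omega) (by omega))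
    · intro a ha b hb
      obtain ⟨k, hk, hka⟩ := List.mem_iff_getElem.mp ha
      simp only [List.length_take] at hk
      have hale : a ≤ w - p := by
        rw [← hka, List.getElem_take]
        exact hrpre k (by omega) (by omega)
      rcases List.mem_cons.mp hb with rfl | hb'
      · exact hale
      · obtain ⟨k2, hk2, hk2b⟩ := List.mem_iff_getElem.mp hb'
        simp only [List.length_drop] at hk2
        rw [List.getElem_drop] at hk2b
        refine le_trans hale (le_of_lt ?_)
        rw [← hk2b]
        exact hrpost ((pvBisect diffs (w - p) 0 (diffs.length : Int)).toNat + k2) (by omega) (by omega)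
  -- the new value map seen by A
  have hrange : PySem.List.pyRange 0 i 1 = PySem.List.pyRange 0 (i-1) 1 ++ [i-1] := by
    have h := PySem.List.pyRange_one_succ_right (a := 0) (b := i-1) (by omega)
    rw [show i - 1 + 1 = i from by omega] at h
    exact h
  have hmapeq : (PySem.List.pyRange 0 (i-1) 1).map
      (fun j => PySem.List.pyGetD (PySem.List.pySetD ws i (PySem.Int.mod (PySem.List.pyGetD ws (i - 1) 0 * mwA) pvMOD)) j 0 - PySem.List.pyGetD (PySem.List.pySetD ps i (PySem.Int.mod (PySem.List.pyGetD ps (i - 1) 0 * mpA) pvMOD)) j 0)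
      = (PySem.List.pyRange 0 (i-1) 1).map
      (fun j => PySem.List.pyGetD ws j 0 - PySem.List.pyGetD ps j 0) := by
    apply List.map_congr_left
    intro j hj
    rw [PySem.List.mem_pyRange_one] at hj
    rw [hgfw j hj.1 (by omega), hgfp j hj.1 (by omega)]
  have hlastval : PySem.List.pyGetD (PySem.List.pySetD ws i (PySem.Int.mod (PySem.List.pyGetD ws (i - 1) 0 * mwA) pvMOD)) (i-1) 0 - PySem.List.pyGetD (PySem.List.pySetD ps i (PySem.Int.mod (PySem.List.pyGetD ps (i - 1) 0 * mpA) pvMOD)) (i-1) 0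
      = w - p := by
    rw [hgfw (i-1) (by omega) (by omega), hgfp (i-1) (by omega) (by omega), hwv, hpv]
  have hperm2 : (PySem.List.insert diffs (pvBisect diffs (w - p) 0 (diffs.length : Int)) (w - p)).Perm ((PySem.List.pyRange 0 i 1).map
      (fun j => PySem.List.pyGetD (PySem.List.pySetD ws i (PySem.Int.mod (PySem.List.pyGetD ws (i - 1) 0 * mwA) pvMOD)) j 0 - PySem.List.pyGetD (PySem.List.pySetD ps i (PySem.Int.mod (PySem.List.pyGetD ps (i - 1) 0 * mpA) pvMOD)) j 0)) := by
    rw [hrange, List.map_append, hmapeq]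
    have p1 : (PySem.List.insert diffs (pvBisect diffs (w - p) 0 (diffs.length : Int)) (w - p)).Perm ((w - p) :: diffs) := by
      rw [hins2]
      have hmid := List.perm_middle (a := w - p)
        (l₁ := diffs.take (pvBisect diffs (w - p) 0 (diffs.length : Int)).toNat) (l₂ := diffs.drop (pvBisect diffs (w - p) 0 (diffs.length : Int)).toNat)
      rw [List.take_append_drop] at hmid
      exact hmid
    refine p1.trans ?_
    refine ((hperm.cons (w - p)).trans ?_)
    simp only [List.map_cons, List.map_nil, hlastval]
    exact (List.perm_append_singleton _ _).symm
  -- the second binary search of B counts A's inner loop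
  have hspec2 := pvBisect_spec (PySem.List.insert diffs (pvBisect diffs (w - p) 0 (diffs.length : Int)) (w - p)) (PySem.Int.mod (w * mwB) pvMOD)
    ((((PySem.List.insert diffs (pvBisect diffs (w - p) 0 (diffs.length : Int)) (w - p)).length : Int) - 0).toNat) 0 ((PySem.List.insert diffs (pvBisect diffs (w - p) 0 (diffs.length : Int)) (w - p)).length : Int)
    rfl hsort2 (le_refl 0) (by omega) (by omega)
    (fun k hk hklt => absurd hklt (by omega))
    (fun k hk hkge => absurd hkge (by omega))
  obtain ⟨hr20, hr2len, hr2pre, hr2post⟩ := hspec2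
  have hcnt : (((PySem.List.insert diffs (pvBisect diffs (w - p) 0 (diffs.length : Int)) (w - p)).countP (fun t => decide (PySem.Int.mod (w * mwB) pvMOD < t)) : Nat) : Int)
      = ((PySem.List.insert diffs (pvBisect diffs (w - p) 0 (diffs.length : Int)) (w - p)).length : Int) - (pvBisect (PySem.List.insert diffs (pvBisect diffs (w - p) 0 (diffs.length : Int)) (w - p)) (PySem.Int.mod (w * mwB) pvMOD) 0 (((PySem.List.insert diffs (pvBisect diffs (w - p) 0 (diffs.length : Int)) (w - p)).length : Int))) :=
    pvCount_of_boundary _ _ _ hr20 hr2len hr2pre hr2post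
  have hcnt2 : (((PySem.List.pyRange 0 i 1).countP
        (fun j => decide (PySem.List.pyGetD (PySem.List.pySetD ws i (PySem.Int.mod (PySem.List.pyGetD ws (i - 1) 0 * mwA) pvMOD)) j 0 - PySem.List.pyGetD (PySem.List.pySetD ps i (PySem.Int.mod (PySem.List.pyGetD ps (i - 1) 0 * mpA) pvMOD)) j 0
          > PySem.List.pyGetD (PySem.List.pySetD ws i (PySem.Int.mod (PySem.List.pyGetD ws (i - 1) 0 * mwA) pvMOD)) i 0)) : Nat) : Int)
      = ((PySem.List.insert diffs (pvBisect diffs (w - p) 0 (diffs.length : Int)) (w - p)).length : Int) - (pvBisect (PySem.List.insert diffs (pvBisect diffs (w - p) 0 (diffs.length : Int)) (w - p)) (PySem.Int.mod (w * mwB) pvMOD) 0 (((PySem.List.insert diffs (pvBisect diffs (w - p) 0 (diffs.length : Int)) (w - p)).length : Int))) := by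
    rw [← hcnt]
    congr 1
    rw [hperm2.countP_eq, List.countP_map]
    apply List.countP_congr
    intro j hj
    simp only [Function.comp_apply, gt_iff_lt, hgiw]
  -- A's conf after the inner loop
  have hconflen : (conf.length : Int) = N := by
    rw [hconf]; simp only [List.length_append, List.length_replicate]; omega
  have hbump2 : (PySem.List.pyRange 0 i 1).foldl (fun conf j =>
        if PySem.List.pyGetD (PySem.List.pySetD ws i (PySem.Int.mod (PySem.List.pyGetD ws (i - 1) 0 * mwA) pvMOD)) j 0 - PySem.List.pyGetD (PySem.List.pySetD ps i (PySem.Int.mod (PySem.List.pyGetD ps (i - 1) 0 * mpA) pvMOD)) j 0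
            > PySem.List.pyGetD (PySem.List.pySetD ws i (PySem.Int.mod (PySem.List.pyGetD ws (i - 1) 0 * mwA) pvMOD)) i 0 then
          PySem.List.pySetD conf i (PySem.List.pyGetD conf i 0 + 1)
        else conf) conf
      = conf.set i.toNat (conf.getD i.toNat 0 + (((PySem.List.pyRange 0 i 1).countP
          (fun j => decide (PySem.List.pyGetD (PySem.List.pySetD ws i (PySem.Int.mod (PySem.List.pyGetD ws (i - 1) 0 * mwA) pvMOD)) j 0 - PySem.List.pyGetD (PySem.List.pySetD ps i (PySem.Int.mod (PySem.List.pyGetD ps (i - 1) 0 * mpA) pvMOD)) j 0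
            > PySem.List.pyGetD (PySem.List.pySetD ws i (PySem.Int.mod (PySem.List.pyGetD ws (i - 1) 0 * mwA) pvMOD)) i 0)) : Nat) : Int)) :=
    pvFoldl_bump (fun j => PySem.List.pyGetD (PySem.List.pySetD ws i (PySem.Int.mod (PySem.List.pyGetD ws (i - 1) 0 * mwA) pvMOD)) j 0 - PySem.List.pyGetD (PySem.List.pySetD ps i (PySem.Int.mod (PySem.List.pyGetD ps (i - 1) 0 * mpA) pvMOD)) j 0
      > PySem.List.pyGetD (PySem.List.pySetD ws i (PySem.Int.mod (PySem.List.pyGetD ws (i - 1) 0 * mwA) pvMOD)) i 0) (PySem.List.pyRange 0 i 1) conf i hi0 (by omega)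
  have hgd : conf.getD i.toNat 0 = 0 := by
    rw [List.getD_eq_getElem?_getD, hconf, List.getElem?_append_right (by omega)]
    have hlt : i.toNat - res.length < (N - i).toNat := by omega
    simp [hlt]
  -- assemble the new invariant
  have hg3 : (PySem.List.pySetD ws i (PySem.Int.mod (PySem.List.pyGetD ws (i - 1) 0 * mwA) pvMOD)).length = weights.length := by
    rw [PySem.List.length_pySetD, hlw]
  have hg4 : (PySem.List.pySetD ps i (PySem.Int.mod (PySem.List.pyGetD ps (i - 1) 0 * mpA) pvMOD)).length = worries.length := by
    rw [PySem.List.length_pySetD, hlp]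
  have hg5 : PySem.Int.mod (w * mwB) pvMOD = PySem.List.pyGetD (PySem.List.pySetD ws i (PySem.Int.mod (PySem.List.pyGetD ws (i - 1) 0 * mwA) pvMOD)) (i + 1 - 1) 0 := by
    rw [show i + 1 - 1 = i from by ring, hgiw]
  have hg6 : PySem.Int.mod (p * mpB) pvMOD = PySem.List.pyGetD (PySem.List.pySetD ps i (PySem.Int.mod (PySem.List.pyGetD ps (i - 1) 0 * mpA) pvMOD)) (i + 1 - 1) 0 := by
    rw [show i + 1 - 1 = i from by ring, hgip]
  have hg8 : (PySem.List.insert diffs (pvBisect diffs (w - p) 0 (diffs.length : Int)) (w - p)).Perm ((PySem.List.pyRange 0 (i + 1 - 1) 1).map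
      (fun j => PySem.List.pyGetD (PySem.List.pySetD ws i (PySem.Int.mod (PySem.List.pyGetD ws (i - 1) 0 * mwA) pvMOD)) j 0 - PySem.List.pyGetD (PySem.List.pySetD ps i (PySem.Int.mod (PySem.List.pyGetD ps (i - 1) 0 * mpA) pvMOD)) j 0)) := by
    rw [show i + 1 - 1 = i from by ring]
    exact hperm2
  have hg9 : (PySem.List.pyRange 0 i 1).foldl (fun conf j =>
        if PySem.List.pyGetD (PySem.List.pySetD ws i (PySem.Int.mod (PySem.List.pyGetD ws (i - 1) 0 * mwA) pvMOD)) j 0 - PySem.List.pyGetD (PySem.List.pySetD ps i (PySem.Int.mod (PySem.List.pyGetD ps (i - 1) 0 * mpA) pvMOD)) j 0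
            > PySem.List.pyGetD (PySem.List.pySetD ws i (PySem.Int.mod (PySem.List.pyGetD ws (i - 1) 0 * mwA) pvMOD)) i 0 then
          PySem.List.pySetD conf i (PySem.List.pyGetD conf i 0 + 1)
        else conf) conf
      = (res ++ [((PySem.List.insert diffs (pvBisect diffs (w - p) 0 (diffs.length : Int)) (w - p)).length : Int) - (pvBisect (PySem.List.insert diffs (pvBisect diffs (w - p) 0 (diffs.length : Int)) (w - p)) (PySem.Int.mod (w * mwB) pvMOD) 0 (((PySem.List.insert diffs (pvBisect diffs (w - p) 0 (diffs.length : Int)) (w - p)).length : Int)))]) ++ List.replicate (N - (i+1)).toNat 0 := by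
    rw [hbump2, hgd, zero_add, hcnt2, hconf,
      show i.toNat = res.length from by omega, pvSet_append,
      show (N - i).toNat = (N - (i+1)).toNat + 1 from by omega,
      List.replicate_succ, List.set_cons_zero]
    simp
  have hg10 : (((res ++ [((PySem.List.insert diffs (pvBisect diffs (w - p) 0 (diffs.length : Int)) (w - p)).length : Int) - (pvBisect (PySem.List.insert diffs (pvBisect diffs (w - p) 0 (diffs.length : Int)) (w - p)) (PySem.Int.mod (w * mwB) pvMOD) 0 (((PySem.List.insert diffs (pvBisect diffs (w - p) 0 (diffs.length : Int)) (w - p)).length : Int)))]).length : Nat) : Int) = i + 1 := by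
    simp only [List.length_append, List.length_cons, List.length_nil]
    push_cast
    omega
  unfold pvInv pvStepA pvStepB
  dsimp only
  rw [pvFoldA_upd, pvUpd, pvDict_upd, PySem.Dict.get?_empty]
  cases hLast : pvLast updates i with
  | none =>
    exact ⟨hmw, hmp, hg3, hg4, hg5, hg6, hsort2, hg8, hg9, hg10⟩
  | some u =>
    exact ⟨rfl, rfl, hg3, hg4, hg5, hg6, hsort2, hg8, hg9, hg10⟩

lemma pvLoop (N : Int) (weights worries : List Int) (updates : List (List Int))
    (hw : N ≤ (weights.length : Int)) (hp : N ≤ (worries.length : Int)) :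
    ∀ (n : Nat) (i : Int) sA sB, (N - i).toNat = n → 1 ≤ i → i ≤ N →
    pvInv N weights worries i sA sB →
    pvInv N weights worries N ((PySem.List.pyRange i N 1).foldl (pvStepA updates) sA)
      ((PySem.List.pyRange i N 1).foldl (pvStepB (pvUpd updates)) sB) := by
  intro n
  induction n with
  | zero =>
    intro i sA sB hn hi1 hiN hinv
    have : i = N := by omega
    subst this
    rw [PySem.List.pyRange_one_eq_nil (le_refl i)]
    simpa using hinv
  | succ n ih =>
    intro i sA sB hn hi1 hiN hinv
    have hilt : i < N := by omega
    rw [PySem.List.pyRange_one_cons hilt]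
    simp only [List.foldl_cons]
    exact ih (i+1) _ _ (by omega) (by omega) (by omega)
      (pvStep_inv N weights worries updates i sA sB hi1 hilt hw hp hinv)

-- ===== VERDICT (by name: the statement is the Claim_ definition above) =====
theorem calculate_players_confidence_spec : Claim_equal_calculate_players_confidence := by
  intro N weights worries multiplier_w multiplier_p updates hdom hpre
  unfold Spec_calculate_players_confidence
  by_cases hN : N ≤ 1
  · show (List.foldl (pvStepA updates)
        (weights, worries, multiplier_w, multiplier_p, List.replicate N.toNat 0)
        (PySem.List.pyRange 1 N 1)).2.2.2.2 = _
    rw [PySem.List.pyRange_one_eq_nil hN, List.foldl_nil]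
    unfold calculate_players_confidence_alt
    rw [if_pos hN]
  · obtain ⟨hw, hp, -⟩ := hpre (by omega)
    unfold calculate_players_confidence calculate_players_confidence_alt
    rw [if_neg hN]
    show (List.foldl (pvStepA updates)
        (weights, worries, multiplier_w, multiplier_p, List.replicate N.toNat 0)
        (PySem.List.pyRange 1 N 1)).2.2.2.2
      = (List.foldl (pvStepB (pvUpd updates))
        (PySem.List.pyGetD weights 0 0, PySem.List.pyGetD worries 0 0,
          multiplier_w, multiplier_p, ([] : List Int), [(0 : Int)])
        (PySem.List.pyRange 1 N 1)).2.2.2.2.2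
    have hinv0 : pvInv N weights worries 1
        (weights, worries, multiplier_w, multiplier_p, List.replicate N.toNat 0)
        (PySem.List.pyGetD weights 0 0, PySem.List.pyGetD worries 0 0,
          multiplier_w, multiplier_p, ([] : List Int), [(0 : Int)]) := by
      refine ⟨rfl, rfl, rfl, rfl, by norm_num, by norm_num, by simp, ?_, ?_, by simp⟩
      · dsimp only
        rw [show (1:Int) - 1 = 0 from by omega, PySem.List.pyRange_one_eq_nil (le_refl 0)]
        simp
      · dsimp only
        rw [show N.toNat = (N-1).toNat + 1 from by omega, List.replicate_succ]
        simp
    have hfin := pvLoop N weights worries updates hw hp (N-1).toNat 1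
      (weights, worries, multiplier_w, multiplier_p, List.replicate N.toNat 0)
      (PySem.List.pyGetD weights 0 0, PySem.List.pyGetD worries 0 0,
        multiplier_w, multiplier_p, ([] : List Int), [(0 : Int)])
      (by omega) (le_refl 1) (by omega) hinv0
    obtain ⟨-,-,-,-,-,-,-,-, hconf, -⟩ := hfin
    rw [hconf, show (N - N).toNat = 0 from by omega, List.replicate_zero, List.append_nil]
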